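-- pv_equiv track=rewrite | github.com/pypi-data/pypi-mirror-378 | packages/maskinfojp/maskinfojp-0.1.2-py3-none-any.whl/maskinfo/change_displayer.py | highlight_changes_inline
-- ===== SOURCE A (Python) =====
-- def highlight_changes_inline(original: str, modified: str) -> str:
--     """
--     Create an inline highlighted version showing changes.
--
--     Args:
--         original: Original text
--         modified: Modified text
--
--     Returns:
--         Highlighted text string
--     """
--     if original == modified:
--         return modified
--
--     # Simple character-by-character comparison for inline highlighting
--     result = []
--     i = j = 0
--
--     while i < len(original) and j < len(modified):
--         if original[i] == modified[j]:
--             result.append(modified[j])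
--             i += 1
--             j += 1
--         else:
--             # Find the end of the change
--             change_start = j
--             while j < len(modified) and (
--                 i >= len(original) or original[i] != modified[j]
--             ):
--                 j += 1
--                 if i < len(original):
--                     i += 1
--
--             # Highlight the changed part
--             changed_text = modified[change_start:j]
--             result.append(f"\033[93m{changed_text}\033[0m")  # Yellow highlight
--
--     # Add any remaining characters
--     if j < len(modified):
--         result.append(f"\033[93m{modified[j:]}\033[0m")
--
--     return "".join(result)
-- ===== SOURCE B (Python) =====
-- def highlight_changes_inline(original: str, modified: str) -> str:
--     """Position-wise run classification: index k of modified is 'plain' iff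
--     k < len(original) and original[k] == modified[k]; plain runs are emitted
--     as-is, other runs wrapped in yellow ANSI codes."""
--     n, m = len(original), len(modified)
--
--     def plain(k):
--         return k < n and original[k] == modified[k]
--
--     out = []
--     k = 0
--     while k < m:
--         start = k
--         same = plain(k)
--         while k < m and plain(k) == same:
--             k += 1
--         run = modified[start:k]
--         out.append(run if same else "\033[93m" + run + "\033[0m")
--     return "".join(out)
-- ===== Notes on version B (the rewrite author's own statement) =====
-- stated objective: simpler
-- what changed: A's two-index (i,j) scan with a nested change-consuming while and a separate trailing-tail append is replaced by a single-index run classification: each position k of modified is 'plain' iff k < len(original) and original[k] == modified[k], and maximal runs of equal classification are emitted in one loop, wrapping changed runs in the yellow escape.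
import Mathlib
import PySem

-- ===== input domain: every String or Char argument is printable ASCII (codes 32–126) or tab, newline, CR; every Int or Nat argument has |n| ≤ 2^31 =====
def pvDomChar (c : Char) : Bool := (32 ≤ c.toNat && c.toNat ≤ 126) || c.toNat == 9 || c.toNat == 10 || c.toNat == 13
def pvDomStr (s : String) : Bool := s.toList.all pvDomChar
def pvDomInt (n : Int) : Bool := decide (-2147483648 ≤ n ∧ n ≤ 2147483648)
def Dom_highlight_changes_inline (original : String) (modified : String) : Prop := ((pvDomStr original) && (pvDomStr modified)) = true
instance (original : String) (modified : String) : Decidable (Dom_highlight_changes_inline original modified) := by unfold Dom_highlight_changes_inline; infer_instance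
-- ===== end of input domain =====

-- B replaces A's two-index (i,j) scan with nested change-consuming while by a single-index,
-- position-wise run classification (objective: simpler decomposition; same return value).
-- Both while-loops are ported with an explicit fuel counter that only makes the recursion
-- structural: each iteration advances the scan index, so fuel = len(modified) (resp. the
-- remaining length) is always sufficient and the 0-fuel branch is never the deciding one.

-- ANSI escape sequences used by both Pythons ("\033[93m" … "\033[0m"), as char lists.
def pvYellow : List Char := [Char.ofNat 27, '[', '9', '3', 'm']
def pvReset : List Char := [Char.ofNat 27, '[', '0', 'm']

-- ===== PORT A =====
-- A's inner `while`: advances j (and i while i < len(original)) over the changed block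
def aInner (orig mod : List Char) (fuel i j : Nat) : Nat × Nat :=
  match fuel with
  | 0 => (i, j)
  | fuel + 1 =>
    if j < mod.length ∧ (orig.length ≤ i ∨ ¬ (orig.getD i ' ' = mod.getD j ' ')) then
      aInner orig mod fuel (if i < orig.length then i + 1 else i) (j + 1)
    else (i, j)

-- A's outer `while` accumulating `result` (flattened to chars), followed by the trailing append
def aLoop (orig mod : List Char) (fuel i j : Nat) (res : List Char) : List Char :=
  match fuel with
  | 0 => if j < mod.length then res ++ (pvYellow ++ mod.drop j ++ pvReset) else res
  | fuel + 1 =>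
    if i < orig.length ∧ j < mod.length then
      if orig.getD i ' ' = mod.getD j ' ' then
        aLoop orig mod fuel (i + 1) (j + 1) (res ++ [mod.getD j ' '])
      else
        let p := aInner orig mod (mod.length - j) i j
        aLoop orig mod fuel p.1 p.2 (res ++ (pvYellow ++ ((mod.drop j).take (p.2 - j)) ++ pvReset))
    else
      if j < mod.length then res ++ (pvYellow ++ mod.drop j ++ pvReset) else res

def highlight_changes_inline (original : String) (modified : String) : String :=
  if original = modified then modified
  else String.ofList (aLoop original.toList modified.toList modified.toList.length 0 0 [])

-- ===== PORT B =====
-- B's plain(k): k < len(original) and original[k] == modified[k]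
def pvPlain (orig mod : List Char) (k : Nat) : Bool :=
  decide (k < orig.length) && decide (orig.getD k ' ' = mod.getD k ' ')

-- B's inner `while`: end index of the run at k whose classification is `same`
def bRun (orig mod : List Char) (fuel : Nat) (same : Bool) (k : Nat) : Nat :=
  match fuel with
  | 0 => k
  | fuel + 1 =>
    if k < mod.length ∧ pvPlain orig mod k = same then bRun orig mod fuel same (k + 1) else k

-- B's outer `while`, accumulating `out` (flattened to chars)
def bLoop (orig mod : List Char) (fuel k : Nat) (out : List Char) : List Char :=
  match fuel with
  | 0 => out
  | fuel + 1 =>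
    if k < mod.length then
      let same := pvPlain orig mod k
      let k' := bRun orig mod (mod.length - k) same k
      let run := (mod.drop k).take (k' - k)
      bLoop orig mod fuel k' (out ++ (if same then run else pvYellow ++ run ++ pvReset))
    else out

def highlight_changes_inline_alt (original : String) (modified : String) : String :=
  String.ofList (bLoop original.toList modified.toList modified.toList.length 0 [])

-- ===== PRECONDITION & SPEC =====
def Spec_highlight_changes_inline (original : String) (modified : String) (out : String) : Prop := out = highlight_changes_inline_alt original modified
instance (original : String) (modified : String) (out : String) : Decidable (Spec_highlight_changes_inline original modified out) := by unfold Spec_highlight_changes_inline; infer_instance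

-- ===== CLAIM (what is proved, stated in full; the proofs are below) =====
def Claim_equal_highlight_changes_inline : Prop := ∀ (original : String) (modified : String), Dom_highlight_changes_inline original modified → Spec_highlight_changes_inline original modified (highlight_changes_inline original modified)

-- ===== LEMMAS AND PROOFS =====

-- pvPlain as a proposition
theorem pvPlain_true (orig mod : List Char) (k : Nat) :
    pvPlain orig mod k = true ↔ (k < orig.length ∧ orig.getD k ' ' = mod.getD k ' ') := by
  simp [pvPlain]

theorem bRun_stop (orig mod : List Char) (f : Nat) (same : Bool) (k : Nat)
    (h : ¬ (k < mod.length ∧ pvPlain orig mod k = same)) : bRun orig mod f same k = k := by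
  cases f with
  | zero => rfl
  | succ f => simp only [bRun]; rw [if_neg h]

theorem bRun_step (orig mod : List Char) (f : Nat) (same : Bool) (k : Nat)
    (h : k < mod.length ∧ pvPlain orig mod k = same) :
    bRun orig mod (f + 1) same k = bRun orig mod f same (k + 1) := by
  simp only [bRun]; rw [if_pos h]

-- bRun never moves backwards
theorem bRun_ge (orig mod : List Char) (same : Bool) :
    ∀ (f k : Nat), k ≤ bRun orig mod f same k := by
  intro f
  induction f with
  | zero => intro k; simp [bRun]
  | succ f ih =>
    intro k
    by_cases h : k < mod.length ∧ pvPlain orig mod k = same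
    · rw [bRun_step orig mod f same k h]
      exact le_trans (Nat.le_succ k) (ih (k + 1))
    · rw [bRun_stop orig mod (f + 1) same k h]

-- the canonical-fuel step used by bLoop's body
theorem bRun_cstep (orig mod : List Char) (same : Bool) (k : Nat)
    (hk : k < mod.length) (hp : pvPlain orig mod k = same) :
    bRun orig mod (mod.length - k) same k
      = bRun orig mod (mod.length - (k + 1)) same (k + 1) := by
  rw [show mod.length - k = (mod.length - (k + 1)) + 1 from by omega,
    bRun_step orig mod (mod.length - (k + 1)) same k ⟨hk, hp⟩]

-- bRun runs to the end of modified when every remaining position classifies as `same`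
theorem bRun_to_end (orig mod : List Char) (same : Bool) :
    ∀ (f k : Nat), mod.length - k ≤ f → k ≤ mod.length →
      (∀ t, k ≤ t → t < mod.length → pvPlain orig mod t = same) →
      bRun orig mod f same k = mod.length := by
  intro f
  induction f with
  | zero =>
    intro k hf hk _
    rw [bRun_stop orig mod 0 same k (by rintro ⟨h1, _⟩; omega)]
    omega
  | succ f ih =>
    intro k hf hk hall
    by_cases hkm : k < mod.length
    · rw [bRun_step orig mod f same k ⟨hkm, hall k le_rfl hkm⟩]
      exact ih (k + 1) (by omega) (by omega) (fun t ht => hall t (by omega))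
    · rw [bRun_stop orig mod (f + 1) same k (by rintro ⟨h1, _⟩; omega)]
      omega

-- A's inner while, entered with i = min j n, computes exactly B's bRun with same = false
theorem aInner_eq_bRun (orig mod : List Char) :
    ∀ (f j : Nat), aInner orig mod f (min j orig.length) j
      = (min (bRun orig mod f false j) orig.length, bRun orig mod f false j) := by
  intro f
  induction f with
  | zero => intro j; simp [aInner, bRun]
  | succ f ih =>
    intro j
    by_cases hC : j < mod.length ∧ pvPlain orig mod j = false
    · have hA : j < mod.length ∧ (orig.length ≤ min j orig.length ∨
          ¬ (orig.getD (min j orig.length) ' ' = mod.getD j ' ')) := by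
        refine ⟨hC.1, ?_⟩
        by_cases hjn : j < orig.length
        · right
          rw [show min j orig.length = j from by omega]
          intro heq
          have : pvPlain orig mod j = true := (pvPlain_true orig mod j).mpr ⟨hjn, heq⟩
          simp [this] at hC
        · left; omega
      simp only [aInner, bRun]
      rw [if_pos hA, if_pos hC]
      have harg : (if min j orig.length < orig.length then min j orig.length + 1
          else min j orig.length) = min (j + 1) orig.length := by
        by_cases hjn : j < orig.length
        · rw [if_pos (by omega : min j orig.length < orig.length)]; omega
        · rw [if_neg (by omega : ¬ min j orig.length < orig.length)]; omega
      rw [harg]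
      exact ih (j + 1)
    · have hA : ¬ (j < mod.length ∧ (orig.length ≤ min j orig.length ∨
          ¬ (orig.getD (min j orig.length) ' ' = mod.getD j ' '))) := by
        rintro ⟨h1, h2⟩
        apply hC
        refine ⟨h1, ?_⟩
        have hnt : ¬ (pvPlain orig mod j = true) := by
          rw [pvPlain_true]
          rintro ⟨hjn', heq⟩
          rcases h2 with h2 | h2
          · omega
          · rw [show min j orig.length = j from by omega] at h2; exact h2 heq
        simpa using hnt
      simp only [aInner, bRun]
      rw [if_neg hA, if_neg hC]

-- bLoop returns its accumulator once the index is past the end, whatever the fuel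
theorem bLoop_exit (orig mod : List Char) :
    ∀ (f k : Nat) (out : List Char), mod.length ≤ k → bLoop orig mod f k out = out := by
  intro f k out hk
  cases f with
  | zero => rfl
  | succ f => simp only [bLoop]; rw [if_neg (by omega : ¬ k < mod.length)]

-- any sufficient fuel computes the same bLoop value
theorem bLoop_fuel (orig mod : List Char) :
    ∀ (f₁ f₂ k : Nat) (out : List Char), mod.length - k ≤ f₁ → mod.length - k ≤ f₂ →
      bLoop orig mod f₁ k out = bLoop orig mod f₂ k out := by
  intro f₁
  induction f₁ with
  | zero =>
    intro f₂ k out h1 h2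
    rw [bLoop_exit orig mod 0 k out (by omega), bLoop_exit orig mod f₂ k out (by omega)]
  | succ f₁ ih =>
    intro f₂ k out h1 h2
    by_cases hk : k < mod.length
    · obtain ⟨f₂', rfl⟩ : ∃ f₂', f₂ = f₂' + 1 := ⟨f₂ - 1, by omega⟩
      simp only [bLoop]
      rw [if_pos hk, if_pos hk]
      have hstep : bRun orig mod (mod.length - k) (pvPlain orig mod k) k
          = bRun orig mod (mod.length - (k + 1)) (pvPlain orig mod k) (k + 1) :=
        bRun_cstep orig mod (pvPlain orig mod k) k hk rfl
      have hge : k + 1 ≤ bRun orig mod (mod.length - k) (pvPlain orig mod k) k := by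
        rw [hstep]; exact bRun_ge orig mod (pvPlain orig mod k) _ (k + 1)
      exact ih f₂' _ _ (by omega) (by omega)
    · rw [bLoop_exit orig mod (f₁ + 1) k out (by omega),
        bLoop_exit orig mod f₂ k out (by omega)]

-- absorbing one plain character into B's loop
theorem bLoop_cons_plain (orig mod : List Char) (j : Nat) (res : List Char)
    (hj : j < mod.length) (hp : pvPlain orig mod j = true) :
    bLoop orig mod (mod.length - j) j res
      = bLoop orig mod (mod.length - (j + 1)) (j + 1) (res ++ [mod.getD j ' ']) := by
  have hstep : bRun orig mod (mod.length - j) true j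
      = bRun orig mod (mod.length - (j + 1)) true (j + 1) :=
    bRun_cstep orig mod true j hj hp
  have hdrop : mod.drop j = mod.getD j ' ' :: mod.drop (j + 1) := by
    rw [List.getD_eq_getElem?_getD, List.getElem?_eq_getElem hj]
    exact List.drop_eq_getElem_cons hj
  obtain ⟨t, ht⟩ : ∃ t, mod.length - j = t + 1 := ⟨mod.length - (j + 1), by omega⟩
  have htf : t = mod.length - (j + 1) := by omega
  rw [ht]
  simp only [bLoop]
  rw [if_pos hj]
  simp only [hp, if_true, htf, hstep]
  set k₂ := bRun orig mod (mod.length - (j + 1)) true (j + 1) with hk₂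
  have hge2 : j + 1 ≤ k₂ := bRun_ge orig mod true _ (j + 1)
  have htake : (mod.drop j).take (k₂ - j)
      = mod.getD j ' ' :: (mod.drop (j + 1)).take (k₂ - (j + 1)) := by
    rw [hdrop, show k₂ - j = (k₂ - (j + 1)) + 1 from by omega, List.take_succ_cons]
  rw [htake]
  by_cases h2 : j + 1 < mod.length ∧ pvPlain orig mod (j + 1) = true
  · obtain ⟨t2, ht2⟩ : ∃ t2, mod.length - (j + 1) = t2 + 1 := ⟨mod.length - (j + 2), by omega⟩
    conv_rhs => rw [ht2]
    simp only [bLoop]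
    rw [if_pos h2.1]
    simp only [h2.2, if_true, ← hk₂]
    have hge3 : j + 2 ≤ k₂ := by
      rw [hk₂, bRun_cstep orig mod true (j + 1) h2.1 h2.2]
      exact bRun_ge orig mod true _ (j + 2)
    rw [show (res ++ [mod.getD j ' '])
        ++ (mod.drop (j + 1)).take (k₂ - (j + 1))
        = res ++ (mod.getD j ' ' :: (mod.drop (j + 1)).take (k₂ - (j + 1))) from by simp]
    exact bLoop_fuel orig mod (mod.length - (j + 1)) t2 k₂ _ (by omega) (by omega)
  · have hstop : k₂ = j + 1 := by rw [hk₂]; exact bRun_stop orig mod _ true (j + 1) h2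
    rw [hstop]
    simp

-- the main loop correspondence: A's outer while with i = min j n equals B's run loop
theorem main_loop_eq (orig mod : List Char) :
    ∀ (f j : Nat) (res : List Char), mod.length - j ≤ f →
      aLoop orig mod f (min j orig.length) j res
        = bLoop orig mod (mod.length - j) j res := by
  intro f
  induction f with
  | zero =>
    intro j res hf
    rw [show mod.length - j = 0 from by omega]
    simp only [aLoop, bLoop]
    rw [if_neg (by omega : ¬ j < mod.length)]
  | succ f ih =>
    intro j res hf
    by_cases hjm : j < mod.length
    · by_cases hjn : j < orig.length
      · have hmin : min j orig.length = j := by omega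
        by_cases heq : orig.getD j ' ' = mod.getD j ' '
        · -- plain position: A emits one char, B absorbs it into the current run
          have hp : pvPlain orig mod j = true := (pvPlain_true orig mod j).mpr ⟨hjn, heq⟩
          simp only [aLoop, hmin]
          rw [if_pos ⟨hjn, hjm⟩, if_pos heq]
          have h' := ih (j + 1) (res ++ [mod.getD j ' ']) (by omega)
          rw [show min (j + 1) orig.length = j + 1 from by omega] at h'
          rw [h']
          exact (bLoop_cons_plain orig mod j res hjm hp).symm
        · -- changed position: both scan the same changed run
          have hp : ¬ pvPlain orig mod j = true := by
            rw [pvPlain_true]; rintro ⟨_, h⟩; exact heq h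
          have hpf : pvPlain orig mod j = false := by simpa using hp
          have hinner := aInner_eq_bRun orig mod (mod.length - j) j
          rw [hmin] at hinner
          have hjstep : bRun orig mod (mod.length - j) false j
              = bRun orig mod (mod.length - (j + 1)) false (j + 1) :=
            bRun_cstep orig mod false j hjm hpf
          have hge : j + 1 ≤ bRun orig mod (mod.length - j) false j := by
            rw [hjstep]; exact bRun_ge orig mod false _ (j + 1)
          simp only [aLoop, hmin]
          rw [if_pos ⟨hjn, hjm⟩, if_neg heq]
          simp only [hinner]
          rw [ih (bRun orig mod (mod.length - j) false j) _ (by omega)]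
          -- now reduce B's loop by one step on the right
          conv_rhs => rw [show mod.length - j = (mod.length - (j + 1)) + 1 from by omega]
          conv_rhs => simp only [bLoop]
          rw [if_pos hjm]
          simp only [hpf, Bool.false_eq_true, if_false]
          exact bLoop_fuel orig mod _ _ _ _ (by omega) (by omega)
      · -- original exhausted: A's trailing yellow block is B's final changed run
        have hpf : pvPlain orig mod j = false := by
          have h' : ¬ j < orig.length := hjn
          simp [pvPlain, h']
        have hend : bRun orig mod (mod.length - j) false j = mod.length := by
          refine bRun_to_end orig mod false (mod.length - j) j le_rfl (by omega) ?_
          intro t ht htm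
          have h' : ¬ t < orig.length := by omega
          simp [pvPlain, h']
        simp only [aLoop]
        rw [if_neg (by omega : ¬ (min j orig.length < orig.length ∧ j < mod.length)),
          if_pos hjm]
        conv_rhs => rw [show mod.length - j = (mod.length - (j + 1)) + 1 from by omega]
        conv_rhs => simp only [bLoop]
        rw [if_pos hjm]
        simp only [hpf, Bool.false_eq_true, if_false, hend]
        have htake : (mod.drop j).take (mod.length - j) = mod.drop j := by
          apply List.take_of_length_le
          simp
        rw [htake, bLoop_exit orig mod _ mod.length _ le_rfl]
    · simp only [aLoop]
      rw [if_neg (by omega : ¬ (min j orig.length < orig.length ∧ j < mod.length)),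
        if_neg hjm, show mod.length - j = 0 from by omega]
      rfl

-- on equal strings B reproduces modified verbatim
theorem bLoop_self (mod : List Char) : bLoop mod mod mod.length 0 [] = mod := by
  by_cases hm : 0 < mod.length
  · have hp0 : pvPlain mod mod 0 = true := by simp [pvPlain, hm]
    have hend : bRun mod mod (mod.length - 0) true 0 = mod.length := by
      refine bRun_to_end mod mod true (mod.length - 0) 0 (by omega) (by omega) ?_
      intro t _ htm
      simp [pvPlain, htm]
    obtain ⟨t, ht⟩ : ∃ t, mod.length = t + 1 := ⟨mod.length - 1, by omega⟩
    conv_lhs => rw [ht]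
    simp only [bLoop]
    rw [if_pos (by omega : (0 : Nat) < mod.length)]
    simp only [hp0, if_true, hend]
    have htake : (mod.drop 0).take (mod.length - 0) = mod := by
      simp
    rw [htake, bLoop_exit mod mod t mod.length _ le_rfl]
    simp
  · have hnil : mod = [] := by
      cases mod with
      | nil => rfl
      | cons c cs => simp at hm
    subst hnil
    rfl

-- ===== VERDICT (by name: the statement is the Claim_ definition above) =====
theorem highlight_changes_inline_spec : Claim_equal_highlight_changes_inline := by
  intro original modified _
  unfold Spec_highlight_changes_inline highlight_changes_inline highlight_changes_inline_alt
  by_cases h : original = modified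
  · rw [if_pos h, h, bLoop_self, String.ofList_toList]
  · rw [if_neg h]
    have := main_loop_eq original.toList modified.toList modified.toList.length 0 [] (by omega)
    rw [Nat.zero_min, Nat.sub_zero] at this
    rw [this]
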